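-- pv_equiv track=rewrite | github.com/ctiller15/advent_of_code | day_1/solution_pt_2.py | check_letters_left
-- ===== SOURCE A (Python) =====
-- numbers_list = [
--     {
--         "name": "one",
--         "value": "1"
--     },
--     {
--         "name": "two",
--         "value": "2"
--     },
--     {
--         "name": "three",
--         "value": "3"
--     },
--     {
--         "name": "four",
--         "value": "4"
--     },
--     {
--         "name": "five",
--         "value": "5"
--     },
--     {
--         "name": "six",
--         "value": "6"
--     },
--     {
--         "name": "seven",
--         "value": "7"
--     },
--     {
--         "name": "eight",
--         "value": "8"
--     },
--     {
--         "name": "nine",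
--         "value": "9"
--     }
-- ]
--
-- def check_letters_left(cal_str_slice: str) -> int | None:
--     ind = 0
--     numbers_remaining = [num for num in numbers_list]
--     while ind <= 5 and ind < len(cal_str_slice):
--         numbers_remaining = [num for num in numbers_remaining if num["name"][ind] == cal_str_slice[ind]]
--         ind = ind + 1
--
--         if len(numbers_remaining) == 0:
--             return None
--
--         success_candidates = [num for num in numbers_remaining if len(num["name"]) == ind]
--
--         if len(success_candidates) > 0:
--             return success_candidates[0]["value"]
-- ===== SOURCE B (Python) =====
-- _NUMBER_WORDS = [
--     ("one", "1"), ("two", "2"), ("three", "3"),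
--     ("four", "4"), ("five", "5"), ("six", "6"),
--     ("seven", "7"), ("eight", "8"), ("nine", "9"),
-- ]
--
-- def check_letters_left(cal_str_slice: str):
--     for name, value in _NUMBER_WORDS:
--         if cal_str_slice.startswith(name):
--             return value
--     return None
-- ===== Notes on version B (the rewrite author's own statement) =====
-- stated objective: simpler
-- what changed: Replaces A's column-wise candidate-set filtering loop (repeatedly narrowing the list of number words by comparing one character position per iteration, with emptiness and exact-length success checks) by a direct per-word prefix test: iterate once over the nine (name, value) pairs and return the value of the first name that is a prefix of the slice; since no number word is a prefix of another, at most one test succeeds and results are identical.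
import Mathlib
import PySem

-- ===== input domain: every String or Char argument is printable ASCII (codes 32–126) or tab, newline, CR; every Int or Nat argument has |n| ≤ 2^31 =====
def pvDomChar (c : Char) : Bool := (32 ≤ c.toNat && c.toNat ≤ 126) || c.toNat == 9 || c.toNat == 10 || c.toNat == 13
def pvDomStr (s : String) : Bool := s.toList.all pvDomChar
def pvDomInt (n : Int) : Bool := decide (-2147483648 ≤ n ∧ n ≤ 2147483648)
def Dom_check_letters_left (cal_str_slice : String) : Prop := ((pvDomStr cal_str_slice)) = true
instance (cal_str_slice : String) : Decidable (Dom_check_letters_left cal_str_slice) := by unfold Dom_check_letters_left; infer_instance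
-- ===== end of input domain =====

-- B replaces A's column-wise candidate-set filtering by a direct per-word prefix test (simpler, same cost).

-- ===== PORT A =====
-- the module-level numbers_list: each dict {"name": …, "value": …} becomes a (name, value) pair
def pvNumbersList : List (String × String) :=
  [("one", "1"), ("two", "2"), ("three", "3"), ("four", "4"), ("five", "5"),
   ("six", "6"), ("seven", "7"), ("eight", "8"), ("nine", "9")]

-- the while-loop of A; `ind` is the Python loop variable.
-- num["name"][ind]: on every reachable state the surviving candidates' names are longer than
-- `ind` (Python would raise IndexError otherwise, and never does), so getD's default is inert;
-- cal_str_slice[ind] is in range by the loop condition ind < len.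
def pvLoopA (cs : List Char) (cands : List (String × String)) (ind : Nat) : Option String :=
  if ind ≤ 5 ∧ ind < cs.length then
    let rem := cands.filter (fun p => p.1.toList.getD ind ' ' == cs.getD ind ' ')
    if rem.length = 0 then
      none
    else
      let succ := rem.filter (fun p => p.1.toList.length = ind + 1)
      if 0 < succ.length then some succ.headI.2
      else pvLoopA cs rem (ind + 1)
  else none
termination_by 6 - ind
decreasing_by omega

def check_letters_left (cal_str_slice : String) : Option String :=
  pvLoopA cal_str_slice.toList pvNumbersList 0

-- ===== PORT B =====
-- for name, value in _NUMBER_WORDS: if cal_str_slice.startswith(name): return value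
def pvLoopB (s : String) : List (String × String) → Option String
  | [] => none
  | (name, value) :: rest =>
      if PySem.Str.startswith s name then some value else pvLoopB s rest

def check_letters_left_alt (cal_str_slice : String) : Option String :=
  pvLoopB cal_str_slice pvNumbersList

-- ===== PRECONDITION & SPEC =====
def Spec_check_letters_left (cal_str_slice : String) (out : Option String) : Prop := out = check_letters_left_alt cal_str_slice
instance (cal_str_slice : String) (out : Option String) : Decidable (Spec_check_letters_left cal_str_slice out) := by unfold Spec_check_letters_left; infer_instance

-- ===== CLAIM (what is proved, stated in full; the proofs are below) =====
def Claim_equal_check_letters_left : Prop := ∀ (cal_str_slice : String), Dom_check_letters_left cal_str_slice → Spec_check_letters_left cal_str_slice (check_letters_left cal_str_slice)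

-- ===== LEMMAS AND PROOFS =====

-- invariant predicates: "the first k characters of the name match the slice", with a strict
-- (candidate survives into the next round) resp. non-strict length bound
def pvPb (cs : List Char) (k : Nat) (p : String × String) : Bool :=
  decide (k < p.1.toList.length) && (p.1.toList.take k == cs.take k)

def pvQb (cs : List Char) (k : Nat) (p : String × String) : Bool :=
  decide (k ≤ p.1.toList.length) && (p.1.toList.take k == cs.take k)

lemma pv_words_len : ∀ p ∈ pvNumbersList, 0 < p.1.toList.length ∧ p.1.toList.length ≤ 5 := by decide

-- no number word is a prefix of another (so at most one word is a prefix of the slice)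
lemma pv_words_nopre :
    ∀ p ∈ pvNumbersList, ∀ q ∈ pvNumbersList, p.1.toList <+: q.1.toList → p = q := by decide

lemma pv_loopB_none (s : String) (l : List (String × String))
    (h : ∀ p ∈ l, ¬ p.1.toList <+: s.toList) : pvLoopB s l = none := by
  induction l with
  | nil => rfl
  | cons a t ih =>
    obtain ⟨n, v⟩ := a
    have hn : ¬ (PySem.Str.startswith s n = true) := by
      simp only [PySem.Str.startswith_eq, PySem.Chars.startswith_iff]
      exact h (n, v) (by simp)
    simp only [pvLoopB, if_neg hn]
    exact ih fun p hp => h p (List.mem_cons_of_mem _ hp)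

lemma pv_loopB_some (s : String) (l : List (String × String)) (p : String × String)
    (hmem : p ∈ l) (hp : p.1.toList <+: s.toList)
    (hu : ∀ q ∈ l, q.1.toList <+: s.toList → q = p) : pvLoopB s l = some p.2 := by
  induction l with
  | nil => cases hmem
  | cons a t ih =>
    obtain ⟨n, v⟩ := a
    by_cases hsw : PySem.Str.startswith s n = true
    · have hpre : n.toList <+: s.toList := by
        simpa only [PySem.Str.startswith_eq, PySem.Chars.startswith_iff] using hsw
      have heq := hu (n, v) (by simp) hpre
      simp only [pvLoopB, if_pos hsw, ← heq]
    · have hnpre : ¬ n.toList <+: s.toList := by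
        simpa only [PySem.Str.startswith_eq, PySem.Chars.startswith_iff] using hsw
      have hmem' : p ∈ t := by
        rcases List.mem_cons.mp hmem with h | h
        · exact absurd (by rw [h] at hp; exact hp) hnpre
        · exact h
      simp only [pvLoopB, if_neg hsw]
      exact ih hmem' fun q hq => hu q (List.mem_cons_of_mem _ hq)

-- a prefix of the slice satisfies pvQb at every level its length admits
lemma pv_pre_Qb (cs : List Char) (p : String × String) (k : Nat)
    (hlen : k ≤ p.1.toList.length) (hpre : p.1.toList <+: cs) : pvQb cs k p = true := by
  obtain ⟨t, ht⟩ := hpre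
  rw [pvQb, ← ht, List.take_append_of_le_length hlen]
  simpa using hlen

-- one filtering round: keep candidates matching at column `ind` = match the first ind+1 chars
lemma pv_step_pred (cs : List Char) (p : String × String) (ind : Nat) (hcs : ind < cs.length) :
    ((p.1.toList.getD ind ' ' == cs.getD ind ' ') && pvPb cs ind p) = pvQb cs (ind + 1) p := by
  unfold pvPb pvQb
  by_cases h : ind < p.1.toList.length
  · rw [Bool.eq_iff_iff]
    simp only [List.take_add_one, List.getElem?_eq_getElem h, List.getElem?_eq_getElem hcs,
      List.getD_eq_getElem _ _ h, List.getD_eq_getElem _ _ hcs, Option.toList_some,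
      Bool.and_eq_true, beq_iff_eq, decide_eq_true_eq, List.append_singleton_inj]

    constructor
    · rintro ⟨hc, _, ht⟩; exact ⟨by omega, ht, hc⟩
    · rintro ⟨_, ht, hc⟩; exact ⟨hc, h, ht⟩
  · have h' : ¬ ind < p.1.length := by simpa using h
    simp [h']

lemma pv_headI_mem {α : Type} [Inhabited α] (l : List α) (h : l ≠ []) : l.headI ∈ l := by
  cases l with
  | nil => exact absurd rfl h
  | cons a t => simp

lemma pv_loopA_eq (s : String) : ∀ n ind cands, ind + n = 6 →
    cands = pvNumbersList.filter (pvPb s.toList ind) →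
    (∀ p ∈ pvNumbersList, p.1.toList <+: s.toList → ind < p.1.toList.length) →
    pvLoopA s.toList cands ind = pvLoopB s pvNumbersList := by
  intro n
  induction n with
  | zero =>
    intro ind cands h6 _ hnp
    rw [pvLoopA, if_neg (by omega)]
    refine (pv_loopB_none s _ fun p hp hpre => ?_).symm
    have := hnp p hp hpre
    have := (pv_words_len p hp).2
    omega
  | succ n ih =>
    intro ind cands h6 hc hnp
    by_cases hlt : ind < s.toList.length
    · rw [pvLoopA, if_pos ⟨by omega, hlt⟩]
      have hrem : cands.filter (fun p => p.1.toList.getD ind ' ' == s.toList.getD ind ' ')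
          = pvNumbersList.filter (pvQb s.toList (ind + 1)) := by
        rw [hc, List.filter_filter]
        exact List.filter_congr fun p _ => pv_step_pred s.toList p ind hlt
      rw [hrem]
      -- a word that is a prefix of the slice survives this round
      have hsurv : ∀ p ∈ pvNumbersList, p.1.toList <+: s.toList →
          p ∈ pvNumbersList.filter (pvQb s.toList (ind + 1)) := fun p hp hpre =>
        List.mem_filter.mpr ⟨hp, pv_pre_Qb _ _ _ (hnp p hp hpre) hpre⟩
      by_cases hempty : (pvNumbersList.filter (pvQb s.toList (ind + 1))).length = 0
      · rw [if_pos hempty]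
        refine (pv_loopB_none s _ fun p hp hpre => ?_).symm
        have := hsurv p hp hpre
        rw [List.length_eq_zero_iff.mp hempty] at this
        cases this
      · rw [if_neg hempty]
        by_cases hsucc :
            0 < ((pvNumbersList.filter (pvQb s.toList (ind + 1))).filter
                  (fun p => p.1.toList.length = ind + 1)).length
        · rw [if_pos hsucc]
          set succ := (pvNumbersList.filter (pvQb s.toList (ind + 1))).filter
            (fun p => p.1.toList.length = ind + 1) with hsdef
          have hne : succ ≠ [] := by
            intro h; rw [h] at hsucc; simp at hsucc
          have hmem : succ.headI ∈ succ := pv_headI_mem succ hne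
          obtain ⟨hin, hlen⟩ := List.mem_filter.mp hmem
          obtain ⟨hinL, hQ⟩ := List.mem_filter.mp hin
          have hlen' : succ.headI.1.toList.length = ind + 1 := by simpa using hlen
          have htake : succ.headI.1.toList = s.toList.take (ind + 1) := by
            have := (Bool.and_eq_true _ _).mp hQ
            have heq : succ.headI.1.toList.take (ind + 1) = s.toList.take (ind + 1) :=
              beq_iff_eq.mp this.2
            rw [← heq, List.take_of_length_le (by omega)]
          have hpre : succ.headI.1.toList <+: s.toList := htake ▸ List.take_prefix _ _
          refine (pv_loopB_some s pvNumbersList succ.headI hinL hpre fun q hq hqpre => ?_).symm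
          rcases List.prefix_or_prefix_of_prefix hqpre hpre with h | h
          · exact pv_words_nopre q hq succ.headI hinL h
          · exact (pv_words_nopre succ.headI hinL q hq h).symm
        · rw [if_neg hsucc]
          have hsnil : (pvNumbersList.filter (pvQb s.toList (ind + 1))).filter
              (fun p => p.1.toList.length = ind + 1) = [] := by
            refine List.length_eq_zero_iff.mp ?_
            omega
          have hnolen : ∀ p ∈ pvNumbersList.filter (pvQb s.toList (ind + 1)),
              p.1.toList.length ≠ ind + 1 := by
            intro p hp
            have := List.filter_eq_nil_iff.mp hsnil p hp
            simpa using this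
          refine ih (ind + 1) _ (by omega) ?_ ?_
          · refine List.filter_congr fun p hp => ?_
            by_cases hQ : pvQb s.toList (ind + 1) p = true
            · have hmemf : p ∈ pvNumbersList.filter (pvQb s.toList (ind + 1)) :=
                List.mem_filter.mpr ⟨hp, hQ⟩
              have hlen := hnolen p hmemf
              obtain ⟨hle, htk⟩ := (Bool.and_eq_true _ _).mp hQ
              rw [hQ, eq_comm]
              refine (Bool.and_eq_true _ _).mpr ⟨decide_eq_true_eq.mpr ?_, htk⟩
              have := decide_eq_true_eq.mp hle
              omega
            · have hP : pvPb s.toList (ind + 1) p = false := by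
                rw [Bool.eq_false_iff]
                intro hPt
                obtain ⟨hle, htk⟩ := (Bool.and_eq_true _ _).mp hPt
                exact hQ ((Bool.and_eq_true _ _).mpr
                  ⟨decide_eq_true_eq.mpr (by have := decide_eq_true_eq.mp hle; omega), htk⟩)
              rw [hP, Bool.eq_false_iff.mpr hQ]
          · intro p hp hpre
            have hmemf := hsurv p hp hpre
            have := hnolen p hmemf
            obtain ⟨hle, _⟩ := (Bool.and_eq_true _ _).mp (List.mem_filter.mp hmemf).2
            have := decide_eq_true_eq.mp hle
            omega
    · rw [pvLoopA, if_neg (by omega)]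
      refine (pv_loopB_none s _ fun p hp hpre => ?_).symm
      have h1 := hnp p hp hpre
      have h2 : p.1.toList.length ≤ s.toList.length := hpre.length_le
      omega

-- ===== VERDICT (by name: the statement is the Claim_ definition above) =====
theorem check_letters_left_spec : Claim_equal_check_letters_left := by
  intro s _
  show check_letters_left s = check_letters_left_alt s
  unfold check_letters_left check_letters_left_alt
  refine pv_loopA_eq s 6 0 pvNumbersList rfl ?_ ?_
  · refine (List.filter_eq_self.mpr fun p hp => ?_).symm
    have h1 := (pv_words_len p hp).1
    rw [pvPb]
    simpa using h1
  · exact fun p hp _ => (pv_words_len p hp).1
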